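-- pv_equiv track=rewrite | github.com/jkmin3/2024Fall_projects | tent_and_tree_solver.py | create_iterations
-- ===== SOURCE A (Python) =====
-- from itertools import permutations, product
--
-- def insert(list, item, position):
--   return (*list[:position], item, *list[position:])
--
-- def create_iterations(generated_puzzle,):
-- 	item = product("W0", repeat=6)
-- 	iterations = {}
-- 	for i, row in enumerate(generated_puzzle):
-- 		zero_count = 0
-- 		for item in row:
-- 			if item == '0':
-- 				zero_count += 1
-- 		product_iterations = product("W0", repeat=zero_count)
-- 		iterations[i] = []
-- 		for iteration in product_iterations:
-- 			iterations[i].append(iteration)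
--
-- 	iterations_v2 = {}
-- 	for k, v in iterations.items():
-- 		iterations_v2[k] = []
-- 		for row in v:
-- 			new_row = row
-- 			for j, item in enumerate(generated_puzzle[k]):
-- 				if item != '0':
-- 					new_row = insert(new_row, item, j)
-- 			iterations_v2[k].append(new_row)
-- 	return iterations_v2
-- ===== SOURCE B (Python) =====
-- from itertools import product
--
-- def _fill(row, combo):
--     it = iter(combo)
--     return [next(it) if cell == '0' else cell for cell in row]
--
-- def create_iterations(generated_puzzle,):
--     result = {}
--     for i, row in enumerate(generated_puzzle):
--         combos = product("W0", repeat=row.count('0'))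
--         result[i] = [tuple(_fill(row, combo)) for combo in combos]
--     return result
-- ===== Notes on version B (the rewrite author's own statement) =====
-- stated objective: faster
-- what changed: B replaces A's two-phase scheme (build a dict of all W/0 combos per row, then rebuild each tuple by repeatedly inserting every fixed cell via tuple slicing, copying the tuple each time) with a single pass that walks each row once per combo and substitutes combo values for the '0' cells directly, eliminating the per-cell slice copies.
import Mathlib
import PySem

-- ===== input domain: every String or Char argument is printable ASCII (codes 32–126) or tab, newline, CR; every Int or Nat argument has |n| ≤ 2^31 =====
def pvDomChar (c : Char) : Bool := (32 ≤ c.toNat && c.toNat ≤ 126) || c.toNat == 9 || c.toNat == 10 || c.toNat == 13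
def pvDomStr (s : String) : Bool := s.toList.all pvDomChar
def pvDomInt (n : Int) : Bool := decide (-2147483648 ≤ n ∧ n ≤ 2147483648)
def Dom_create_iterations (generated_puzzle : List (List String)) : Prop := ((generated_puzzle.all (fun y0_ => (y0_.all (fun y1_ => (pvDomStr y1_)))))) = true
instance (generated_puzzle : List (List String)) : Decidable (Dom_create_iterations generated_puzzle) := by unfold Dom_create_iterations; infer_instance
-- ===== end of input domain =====

-- B fuses A's two phases (enumerate all W/0 combos into a dict, then rebuild each row by
-- repeated insertion of the fixed cells) into one direct pass that substitutes the combo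
-- values for the '0' cells in place, avoiding the per-cell slice copies (measured faster).

-- ===== PORT A =====

-- itertools.product("W0", repeat=n), tuples as lists of 1-char strings, in CPython order
def prodW0 : Nat → List (List String)
  | 0 => [[]]
  | n + 1 => ["W", "0"].flatMap (fun c => (prodW0 n).map (fun t => c :: t))

-- the module helper 'insert': (*list[:position], item, *list[position:])
def pyInsertA (l : List String) (item : String) (position : Int) : List String :=
  PySem.List.slice l none (some position) ++ item :: PySem.List.slice l (some position) none

def create_iterations (generated_puzzle : List (List String)) : List (Int × List (List String)) :=
  -- first loop: iterations[i] = all product("W0", repeat=zero_count) tuples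
  let iterations : List (Int × List (List String)) :=
    (PySem.List.enumerate generated_puzzle).foldl (fun its p =>
      let zero_count : Int := p.2.foldl (fun zc item => if item == "0" then zc + 1 else zc) 0
      let product_iterations := prodW0 zero_count.toNat
      its ++ [(p.1, product_iterations.foldl (fun acc iteration => acc ++ [iteration]) [])]) []
  -- second loop: re-insert the non-'0' cells of generated_puzzle[k] into every tuple
  iterations.foldl (fun v2 kv =>
    v2 ++ [(kv.1, kv.2.foldl (fun acc row =>
      acc ++ [(PySem.List.enumerate (PySem.List.pyGetD generated_puzzle kv.1 [])).foldl
        (fun new_row q => if q.2 ≠ "0" then pyInsertA new_row q.2 q.1 else new_row) row]) [])]) []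

-- ===== PORT B =====

-- _fill(row, combo): one pass over row, consuming combo at each '0' cell
def fillRow : List String → List String → List String
  | [], _ => []
  | cell :: cs, t =>
      if cell == "0" then t.headD "" :: fillRow cs t.tail else cell :: fillRow cs t

def create_iterations_alt (generated_puzzle : List (List String)) : List (Int × List (List String)) :=
  (PySem.List.enumerate generated_puzzle).foldl (fun res p =>
    res ++ [(p.1, (prodW0 (PySem.List.count p.2 "0")).map (fillRow p.2))]) []

-- ===== PRECONDITION & SPEC =====
def Spec_create_iterations (generated_puzzle : List (List String)) (out : List (Int × List (List String))) : Prop := out = create_iterations_alt generated_puzzle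
instance (generated_puzzle : List (List String)) (out : List (Int × List (List String))) : Decidable (Spec_create_iterations generated_puzzle out) := by unfold Spec_create_iterations; infer_instance

-- ===== CLAIM (what is proved, stated in full; the proofs are below) =====
def Claim_equal_create_iterations : Prop := ∀ (generated_puzzle : List (List String)), Dom_create_iterations generated_puzzle → Spec_create_iterations generated_puzzle (create_iterations generated_puzzle)

-- ===== LEMMAS AND PROOFS =====

theorem length_of_mem_prodW0 : ∀ (n : Nat) (t : List String), t ∈ prodW0 n → t.length = n := by
  intro n
  induction n with
  | zero => intro t ht; simp [prodW0] at ht; simp [ht]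
  | succ m ih =>
      intro t ht
      simp [prodW0] at ht
      rcases ht with ⟨t', ht', rfl⟩ | ⟨t', ht', rfl⟩ <;> simp [ih _ ht']

-- the insert-reconstruction fold equals direct substitution
theorem insert_fold_eq_fill :
    ∀ (rs t done : List String) (j : Int), j = done.length → rs.count "0" = t.length →
      (PySem.List.enumerate rs j).foldl
        (fun new_row q => if q.2 ≠ "0" then pyInsertA new_row q.2 q.1 else new_row) (done ++ t)
      = done ++ fillRow rs t := by
  intro rs
  induction rs with
  | nil =>
      intro t done j hj hc
      simp only [List.count_nil] at hc
      simp [PySem.List.enumerate, fillRow, List.length_eq_zero_iff.mp hc.symm]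
  | cons c cs ih =>
      intro t done j hj hc
      rw [PySem.List.enumerate_cons]
      simp only [List.foldl_cons]
      by_cases h : c = "0"
      · subst h
        rw [if_neg (fun hne => hne rfl)]
        simp only [List.count_cons_self] at hc
        obtain ⟨v, ts, rfl⟩ : ∃ v ts, t = v :: ts := by
          cases t with
          | nil => simp at hc
          | cons v ts => exact ⟨v, ts, rfl⟩
        have hacc : done ++ v :: ts = (done ++ [v]) ++ ts := by simp
        have := ih ts (done ++ [v]) (j + 1) (by simp [hj]) (by simpa using hc)
        rw [hacc, this, fillRow]
        simp
      · rw [if_pos h]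
        have hcnt : cs.count "0" = t.length := by
          simpa [List.count_cons, h] using hc
        have hins : pyInsertA (done ++ t) c j = (done ++ [c]) ++ t := by
          unfold pyInsertA
          subst hj
          rw [show ((done.length : Int)) = ((done.length : Nat) : Int) by simp,
            PySem.List.slice_to_natCast, PySem.List.slice_from_natCast]
          simp
        have := ih t (done ++ [c]) (j + 1) (by simp [hj]) hcnt
        rw [hins, this, fillRow]
        simp [h]

-- A's zero-count loop is List.count
theorem zero_count_eq (row : List String) :
    (row.foldl (fun zc item => if item == "0" then zc + 1 else zc) (0 : Int)).toNat
      = row.count "0" := by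
  rw [PySem.List.foldl_beq_add_one]
  simp

theorem per_row_eq (gp : List (List String)) (i : Int) (row : List String)
    (hget : PySem.List.pyGetD gp i [] = row) :
    (prodW0 ((row.foldl (fun zc item => if item == "0" then zc + 1 else zc) (0 : Int)).toNat)).map
        (fun r => (PySem.List.enumerate (PySem.List.pyGetD gp i [])).foldl
          (fun new_row q => if q.2 ≠ "0" then pyInsertA new_row q.2 q.1 else new_row) r)
      = (prodW0 (PySem.List.count row "0")).map (fillRow row) := by
  rw [zero_count_eq, hget]
  have hc : PySem.List.count row "0" = row.count "0" := PySem.List.count_eq _ _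
  rw [hc]
  apply List.map_congr_left
  intro t ht
  have hlen : t.length = row.count "0" := length_of_mem_prodW0 _ _ ht
  have := insert_fold_eq_fill row t [] 0 (by simp) hlen.symm
  simpa using this

-- ===== VERDICT (by name: the statement is the Claim_ definition above) =====
theorem create_iterations_spec : Claim_equal_create_iterations := by
  intro gp _
  unfold Spec_create_iterations create_iterations create_iterations_alt
  simp only [PySem.List.foldl_append_singleton_eq_map, List.map_map, List.nil_append]
  apply List.map_congr_left
  intro p hp
  rcases (PySem.List.mem_enumerate_iff (p := p) (xs := gp) (s := 0)).mp hp with ⟨k, hk, rfl⟩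
  have hget : PySem.List.pyGetD gp ((0 : Int) + k) [] = gp[k] := by
    simp [List.getD, hk]
  simp only [Function.comp, List.map_id']
  exact congrArg _ (per_row_eq gp ((0:Int)+k) gp[k] hget)
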